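-- pv_equiv track=rewrite | github.com/labthings/python-labthings-client | labthings_client/td_parsers.py | find_self_link
-- ===== SOURCE A (Python) =====
-- def find_self_link(links_list: list):
--     return_link = ""
--     # Look for an explicit "self" link
--     for link in links_list:
--         if link.get("rel") == "self":
--             return link.get("href")
--     # Failing that, look for a link with no rel
--     for link in links_list:
--         if link.get("rel") is None:
--             return link.get("href")
--     # Failing that, return the first link
--     if len(links_list) > 0:
--         return links_list[0].get("href")
--     # Failing even that, return empty string
--     return ""
-- ===== SOURCE B (Python) =====
-- def find_self_link(links_list: list):
--     first_no_rel = None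
--     first_href = None
--     seen_no_rel = False
--     seen_any = False
--     for link in links_list:
--         rel = link.get("rel")
--         if rel == "self":
--             return link.get("href")
--         if not seen_any:
--             first_href = link.get("href")
--             seen_any = True
--         if rel is None and not seen_no_rel:
--             first_no_rel = link.get("href")
--             seen_no_rel = True
--     if seen_no_rel:
--         return first_no_rel
--     if seen_any:
--         return first_href
--     return ""
-- ===== Notes on version B (the rewrite author's own statement) =====
-- stated objective: simpler
-- what changed: Single pass that returns the self-link immediately and remembers the first no-rel href and the first href, instead of two full scans plus an indexed fallback.
import Mathlib
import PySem

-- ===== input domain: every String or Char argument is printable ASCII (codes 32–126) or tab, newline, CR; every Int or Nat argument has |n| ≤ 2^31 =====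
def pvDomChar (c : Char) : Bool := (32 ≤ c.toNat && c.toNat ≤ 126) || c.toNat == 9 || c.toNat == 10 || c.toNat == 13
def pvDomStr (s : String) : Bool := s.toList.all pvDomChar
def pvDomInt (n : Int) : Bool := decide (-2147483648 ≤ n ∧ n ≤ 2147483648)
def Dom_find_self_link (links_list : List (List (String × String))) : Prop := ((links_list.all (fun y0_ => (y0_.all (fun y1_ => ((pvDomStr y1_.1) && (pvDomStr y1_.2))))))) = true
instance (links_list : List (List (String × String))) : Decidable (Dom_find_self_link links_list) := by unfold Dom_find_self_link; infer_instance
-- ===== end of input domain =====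

-- B merges A's two scans plus indexed fallback into one pass (objective: simpler / one traversal).

-- ===== PORT A =====
-- first for-loop of A: returns `some v` when it hits `return`, `none` if it falls through
def pvA_selfScan : List (List (String × String)) → Option (Option String)
  | [] => none
  | link :: rest =>
    if (PySem.Dict.mk link).get? "rel" = some "self" then some ((PySem.Dict.mk link).get? "href")
    else pvA_selfScan rest

-- second for-loop of A (rel absent = Python's `link.get("rel") is None`)
def pvA_noRelScan : List (List (String × String)) → Option (Option String)
  | [] => none
  | link :: rest =>
    if (PySem.Dict.mk link).get? "rel" = none then some ((PySem.Dict.mk link).get? "href")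
    else pvA_noRelScan rest

def find_self_link (links_list : List (List (String × String))) : Option String :=
  match pvA_selfScan links_list with
  | some v => v
  | none =>
    match pvA_noRelScan links_list with
    | some v => v
    | none =>
      match links_list with
      | link0 :: _ => (PySem.Dict.mk link0).get? "href"   -- len > 0: links_list[0].get("href")
      | [] => some ""                                 -- return ""

-- ===== PORT B =====
-- one pass; `noRel`/`first` hold (once set) the first no-rel href and the first href
def pvB_loop : List (List (String × String)) → Option (Option String) → Option (Option String) → Option String
  | [], noRel, first =>
    match noRel with
    | some v => v
    | none =>
      match first with
      | some v => v
      | none => some ""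
  | link :: rest, noRel, first =>
    let rel := (PySem.Dict.mk link).get? "rel"
    if rel = some "self" then (PySem.Dict.mk link).get? "href"
    else
      pvB_loop rest
        (if rel = none ∧ noRel = none then some ((PySem.Dict.mk link).get? "href") else noRel)
        (if first = none then some ((PySem.Dict.mk link).get? "href") else first)

def find_self_link_alt (links_list : List (List (String × String))) : Option String :=
  pvB_loop links_list none none

-- ===== PRECONDITION & SPEC =====
def Spec_find_self_link (links_list : List (List (String × String))) (out : Option String) : Prop := out = find_self_link_alt links_list
instance (links_list : List (List (String × String))) (out : Option String) : Decidable (Spec_find_self_link links_list out) := by unfold Spec_find_self_link; infer_instance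

-- ===== CLAIM (what is proved, stated in full; the proofs are below) =====
def Claim_equal_find_self_link : Prop := ∀ (links_list : List (List (String × String))), Dom_find_self_link links_list → Spec_find_self_link links_list (find_self_link links_list)

-- ===== LEMMAS AND PROOFS =====

-- the fallback used by A after its scans, generalized over B's accumulators
def pvAfter (ll : List (List (String × String))) (noRel first : Option (Option String)) : Option String :=
  match (match noRel with | some v => some v | none => pvA_noRelScan ll) with
  | some v => v
  | none =>
    match (match first with | some v => some v | none => (match ll with | l :: _ => some ((PySem.Dict.mk l).get? "href") | [] => none)) with
    | some v => v
    | none => some ""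

theorem pvB_loop_eq (ll : List (List (String × String))) :
    ∀ noRel first, pvB_loop ll noRel first =
      match pvA_selfScan ll with
      | some v => v
      | none => pvAfter ll noRel first := by
  induction ll with
  | nil =>
    intro noRel first
    cases noRel <;> cases first <;> simp [pvB_loop, pvA_selfScan, pvA_noRelScan, pvAfter]
  | cons link rest ih =>
    intro noRel first
    by_cases hs : (PySem.Dict.mk link).get? "rel" = some "self"
    · simp [pvB_loop, pvA_selfScan, hs]
    · by_cases hn : (PySem.Dict.mk link).get? "rel" = none
      · cases noRel <;> cases first <;>
          simp [pvB_loop, pvA_selfScan, pvA_noRelScan, pvAfter, hn, ih]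
      · cases noRel <;> cases first <;>
          simp [pvB_loop, pvA_selfScan, pvA_noRelScan, pvAfter, hs, hn, ih]

-- ===== VERDICT (by name: the statement is the Claim_ definition above) =====
theorem find_self_link_spec : Claim_equal_find_self_link := by
  intro ll _
  unfold Spec_find_self_link find_self_link find_self_link_alt
  rw [pvB_loop_eq]
  cases h : pvA_selfScan ll with
  | some v => rfl
  | none =>
    simp only [pvAfter]
    cases pvA_noRelScan ll <;> cases ll <;> rfl
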